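-- pv_equiv track=rewrite | github.com/bighousevn/Rag_Graph_LawLaw | triplet_extractor_vi.py | pick_subject_for_predicate
-- ===== SOURCE A (Python) =====
-- from typing import Any, Dict, List, Optional, Sequence
--
-- SUBJECT_LABELS = {"nsubj", "nsubj:pass", "csubj", "subj", "sub"}
--
-- BRIDGE_OBJECT_LABELS = {"obj", "dobj", "dob", "iobj", "iob"}
--
-- def pick_subject_for_predicate(
--     pred_idx: int,
--     dep: List[str],
--     head: List[int],
--     fallback_subj_idxs: List[int],
-- ) -> List[int]:
--     subj_idxs = [
--         i
--         for i, d in enumerate(dep, start=1)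
--         if head[i - 1] == pred_idx and d.lower() in SUBJECT_LABELS
--     ]
--     if subj_idxs:
--         return subj_idxs
--
--     # In causative chains, predicate subject often comes from bridge object of ancestor.
--     current = pred_idx
--     visited = set()
--     while 1 <= current <= len(head) and current not in visited:
--         visited.add(current)
--         parent = head[current - 1]
--         if parent <= 0:
--             break
--         bridge = [
--             i
--             for i, d in enumerate(dep, start=1)
--             if head[i - 1] == parent and d.lower() in BRIDGE_OBJECT_LABELS and i < current
--         ]
--         if bridge:
--             return [bridge[-1]]
--         current = parent
--
--     return fallback_subj_idxs
-- ===== SOURCE B (Python) =====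
-- SUBJECT_LABELS = {"nsubj", "nsubj:pass", "csubj", "subj", "sub"}
-- BRIDGE_OBJECT_LABELS = {"obj", "dobj", "dob", "iobj", "iob"}
--
-- def pick_subject_for_predicate(pred_idx, dep, head, fallback_subj_idxs):
--     # Index the tree once: head -> list of (child index, lowercased label), in order.
--     entries = [(head[i - 1], (i, d.lower())) for i, d in enumerate(dep, start=1)]
--     children = {}
--     for k, v in entries:
--         children.setdefault(k, []).append(v)
--
--     subj = [i for i, d in children.get(pred_idx, []) if d in SUBJECT_LABELS]
--     if subj:
--         return subj
--
--     current = pred_idx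
--     visited = set()
--     while 1 <= current <= len(head) and current not in visited:
--         visited.add(current)
--         parent = head[current - 1]
--         if parent <= 0:
--             break
--         bridge = [i for i, d in children.get(parent, [])
--                   if d in BRIDGE_OBJECT_LABELS and i < current]
--         if bridge:
--             return [bridge[-1]]
--         current = parent
--     return fallback_subj_idxs
-- ===== Notes on version B (the rewrite author's own statement) =====
-- stated objective: alternative
-- what changed: B builds a head->children index of the dependency tree once and replaces A's full enumerate-scan per ancestor (and for the subject pass) with dict lookups; it avoids A's rescans on long ancestor chains but pays the index build on the measured inputs.
import Mathlib
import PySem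

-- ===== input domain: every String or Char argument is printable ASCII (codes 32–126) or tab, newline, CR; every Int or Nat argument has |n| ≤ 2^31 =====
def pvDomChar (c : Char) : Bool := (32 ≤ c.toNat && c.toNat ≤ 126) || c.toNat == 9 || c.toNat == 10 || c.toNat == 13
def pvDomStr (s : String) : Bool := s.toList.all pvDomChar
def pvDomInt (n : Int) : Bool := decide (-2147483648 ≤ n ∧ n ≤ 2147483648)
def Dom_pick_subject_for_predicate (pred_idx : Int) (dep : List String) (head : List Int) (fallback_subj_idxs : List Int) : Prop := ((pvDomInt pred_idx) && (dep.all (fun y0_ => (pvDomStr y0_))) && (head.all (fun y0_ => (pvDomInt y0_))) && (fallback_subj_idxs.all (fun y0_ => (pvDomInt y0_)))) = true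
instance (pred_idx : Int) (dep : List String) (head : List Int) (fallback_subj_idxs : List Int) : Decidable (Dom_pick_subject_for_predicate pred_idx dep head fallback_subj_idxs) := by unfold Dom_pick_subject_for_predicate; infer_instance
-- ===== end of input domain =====

-- B indexes the dependency tree once (head -> children dict) so the per-ancestor rescans of A disappear; objective: alternative.

def pvSubjLabels : List String := ["nsubj", "nsubj:pass", "csubj", "subj", "sub"]
def pvBridgeLabels : List String := ["obj", "dobj", "dob", "iobj", "iob"]

-- ===== PORT A =====
-- subj_idxs comprehension of A
def pvA_subj (pred_idx : Int) (dep : List String) (head : List Int) : List Int :=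
  (PySem.List.enumerate dep 1).filterMap (fun p =>
    if head.getD (p.1 - 1).toNat 0 = pred_idx ∧ pvSubjLabels.contains (PySem.Str.lower p.2)
    then some p.1 else none)

-- bridge comprehension of A
def pvA_bridge (parent current : Int) (dep : List String) (head : List Int) : List Int :=
  (PySem.List.enumerate dep 1).filterMap (fun p =>
    if head.getD (p.1 - 1).toNat 0 = parent ∧ pvBridgeLabels.contains (PySem.Str.lower p.2)
       ∧ p.1 < current
    then some p.1 else none)

-- the while loop of A (fuel bounds the iterations; head.length + 1 provably suffices,
-- since each iteration adds a fresh element of 1..head.length to visited)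
def pvA_loop (dep : List String) (head : List Int) (fallback : List Int) :
    Nat → Int → PySem.Set Int → List Int
  | 0, _, _ => fallback
  | fuel + 1, current, visited =>
    if 1 ≤ current ∧ current ≤ (head.length : Int) ∧ ¬ (visited.contains current = true) then
      let visited' := PySem.Set.add visited current
      let parent := head.getD (current - 1).toNat 0
      if parent ≤ 0 then fallback
      else
        match (pvA_bridge parent current dep head).getLast? with
        | some b => [b]
        | none => pvA_loop dep head fallback fuel parent visited'
    else fallback

def pick_subject_for_predicate (pred_idx : Int) (dep : List String) (head : List Int) (fallback_subj_idxs : List Int) : List Int :=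
  let subj_idxs := pvA_subj pred_idx dep head
  if subj_idxs ≠ [] then subj_idxs
  else pvA_loop dep head fallback_subj_idxs (head.length + 1) pred_idx PySem.Set.empty

-- ===== PORT B =====
-- entries = [(head[i-1], (i, d.lower())) for i, d in enumerate(dep, 1)]
def pvB_entries (dep : List String) (head : List Int) : List (Int × (Int × String)) :=
  (PySem.List.enumerate dep 1).map (fun p =>
    (head.getD (p.1 - 1).toNat 0, (p.1, PySem.Str.lower p.2)))

-- children dict built once by the setdefault/append loop
def pvB_children (dep : List String) (head : List Int) : PySem.Dict Int (List (Int × String)) :=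
  (pvB_entries dep head).foldl (fun d p => d.modify p.1 [] (· ++ [p.2])) PySem.Dict.empty

def pvB_subj (pred_idx : Int) (children : PySem.Dict Int (List (Int × String))) : List Int :=
  (children.getD pred_idx []).filterMap (fun q =>
    if pvSubjLabels.contains q.2 then some q.1 else none)

def pvB_bridge (parent current : Int) (children : PySem.Dict Int (List (Int × String))) : List Int :=
  (children.getD parent []).filterMap (fun q =>
    if pvBridgeLabels.contains q.2 ∧ q.1 < current then some q.1 else none)

def pvB_loop (head : List Int) (fallback : List Int)
    (children : PySem.Dict Int (List (Int × String))) :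
    Nat → Int → PySem.Set Int → List Int
  | 0, _, _ => fallback
  | fuel + 1, current, visited =>
    if 1 ≤ current ∧ current ≤ (head.length : Int) ∧ ¬ (visited.contains current = true) then
      let visited' := PySem.Set.add visited current
      let parent := head.getD (current - 1).toNat 0
      if parent ≤ 0 then fallback
      else
        match (pvB_bridge parent current children).getLast? with
        | some b => [b]
        | none => pvB_loop head fallback children fuel parent visited'
    else fallback

def pick_subject_for_predicate_alt (pred_idx : Int) (dep : List String) (head : List Int) (fallback_subj_idxs : List Int) : List Int :=
  let children := pvB_children dep head
  let subj := pvB_subj pred_idx children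
  if subj ≠ [] then subj
  else pvB_loop head fallback_subj_idxs children (head.length + 1) pred_idx PySem.Set.empty

-- ===== PRECONDITION & SPEC =====
-- Pre_ excludes only dep longer than head, where A raises IndexError at head[i-1].
def Pre_pick_subject_for_predicate (pred_idx : Int) (dep : List String) (head : List Int) (fallback_subj_idxs : List Int) : Prop :=
  dep.length ≤ head.length
instance (pred_idx : Int) (dep : List String) (head : List Int) (fallback_subj_idxs : List Int) : Decidable (Pre_pick_subject_for_predicate pred_idx dep head fallback_subj_idxs) := by unfold Pre_pick_subject_for_predicate; infer_instance

def pvWitness_pick_subject_for_predicate : Int × List String × List Int × List Int := (0, ["nsubj"], [0], [2])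

def Spec_pick_subject_for_predicate (pred_idx : Int) (dep : List String) (head : List Int) (fallback_subj_idxs : List Int) (out : List Int) : Prop := out = pick_subject_for_predicate_alt pred_idx dep head fallback_subj_idxs
instance (pred_idx : Int) (dep : List String) (head : List Int) (fallback_subj_idxs : List Int) (out : List Int) : Decidable (Spec_pick_subject_for_predicate pred_idx dep head fallback_subj_idxs out) := by unfold Spec_pick_subject_for_predicate; infer_instance

-- ===== CLAIM (what is proved, stated in full; the proofs are below) =====
def Claim_equal_pick_subject_for_predicate : Prop := ∀ (pred_idx : Int) (dep : List String) (head : List Int) (fallback_subj_idxs : List Int), Dom_pick_subject_for_predicate pred_idx dep head fallback_subj_idxs → Pre_pick_subject_for_predicate pred_idx dep head fallback_subj_idxs → Spec_pick_subject_for_predicate pred_idx dep head fallback_subj_idxs (pick_subject_for_predicate pred_idx dep head fallback_subj_idxs)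

-- ===== LEMMAS AND PROOFS =====


-- filtering then filterMapping is one filterMap
theorem pvFilterMap_filter {α β : Type} (p : α → Bool) (f : α → Option β) (l : List α) :
    (l.filter p).filterMap f = l.filterMap (fun a => if p a then f a else none) := by
  induction l with
  | nil => rfl
  | cons x xs ih =>
    by_cases h : p x = true <;> simp [List.filter_cons, h, List.filterMap_cons, ih]

-- the children dict groups the entries by key, keeping order
theorem pvB_children_getD (dep : List String) (head : List Int) (k : Int) :
    (pvB_children dep head).getD k [] =
      ((pvB_entries dep head).filter (fun p => p.1 == k)).map (·.2) := by
  unfold pvB_children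
  rw [PySem.Dict.getD_foldl_modify_append]
  simp [PySem.Dict.getD_empty]

theorem pvB_subj_eq (pred_idx : Int) (dep : List String) (head : List Int) :
    pvB_subj pred_idx (pvB_children dep head) = pvA_subj pred_idx dep head := by
  unfold pvB_subj pvA_subj
  rw [pvB_children_getD]
  unfold pvB_entries
  rw [List.filter_map, List.map_map, List.filterMap_map, pvFilterMap_filter]
  apply List.filterMap_congr
  intro p _
  by_cases h : head.getD (p.1 - 1).toNat 0 = pred_idx <;>
    simp [h, Function.comp] <;> split_ifs <;> simp_all

theorem pvB_bridge_eq (parent current : Int) (dep : List String) (head : List Int) :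
    pvB_bridge parent current (pvB_children dep head) = pvA_bridge parent current dep head := by
  unfold pvB_bridge pvA_bridge
  rw [pvB_children_getD]
  unfold pvB_entries
  rw [List.filter_map, List.map_map, List.filterMap_map, pvFilterMap_filter]
  apply List.filterMap_congr
  intro p _
  by_cases h : head.getD (p.1 - 1).toNat 0 = parent <;>
    simp [h, Function.comp] <;> split_ifs <;> simp_all

theorem pvB_loop_eq (dep : List String) (head : List Int) (fallback : List Int) :
    ∀ (fuel : Nat) (current : Int) (visited : PySem.Set Int),
      pvB_loop head fallback (pvB_children dep head) fuel current visited =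
        pvA_loop dep head fallback fuel current visited := by
  intro fuel
  induction fuel with
  | zero => intro current visited; rfl
  | succ n ih =>
    intro current visited
    unfold pvB_loop pvA_loop
    simp only [pvB_bridge_eq, ih]

-- ===== VERDICT (by name: the statement is the Claim_ definition above) =====
theorem pick_subject_for_predicate_spec : Claim_equal_pick_subject_for_predicate := by
  intro pred_idx dep head fallback_subj_idxs _ _
  unfold Spec_pick_subject_for_predicate
  unfold pick_subject_for_predicate pick_subject_for_predicate_alt
  simp only [pvB_subj_eq, pvB_loop_eq]
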